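-- pv_equiv track=rewrite | github.com/aepresso/AES-Project-Group-2 | aes/helperFunctions.py | polyMultiply
-- ===== SOURCE A (Python) =====
-- def getDegree(a):
--     """
--     This gets the degree of any polynomial represented as an integer.
--     an example is 0x15 which is 0001 0101 in binary which
--     can be written as x^4 + x^2 + 1; this has a degree of 4.
--
--     Args: the polynomial such as 0x01 or 0001
--     Returns: the degree of the polynomial, -1 if the polynomial is 0
--     """
--     for i in range(15, -1, -1):
--         if (a >> i) & 1:
--             return i
--     return -1
--
-- def polyMod(a, m):
--     """
--     This calculates the polynomial modulo of a by m.
--     a gets divided by m and the remainder is returned.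
--
--     args: a and m are polynomials as integers
--     returns the remainder of a divided by m as an integer
--
--     This functions used to help make mod inverse and polynomial multiplication easier to implement.
--     """
--     if (getDegree(a) == -1 or getDegree(m) == -1):
--         return 0
--     while getDegree(a) >= getDegree(m):
--         a ^= m << (getDegree(a) - getDegree(m))
--     return a
--
-- def polyMultiply(a,b):
--     """
--     This calculates the polynomials multiplication of a and b.
--     args: a and b are polynomials as integers
--     returns the product of a and b as an integer
--     """
--     if (getDegree(a) == -1 or getDegree(b) == -1):
--         return 0
--     result = 0
--     for i in range (16):
--         if (b >> i) & 1:
--             result ^= a << i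
--     return polyMod(result, 0x11B) # Modulo by the irreducible polynomial for AES
-- ===== SOURCE B (Python) =====
-- # Table-driven GF(2) polynomial multiply in 16-bit words: a 4-bit windowed
-- # carry-less multiply (one table of the 16 nibble multiples of a, four lookups)
-- # followed by a one-step reduction that folds the upper byte of the word back
-- # with a precomputed xtime table, instead of bit-by-bit loops.
--
-- _POLY = 0x11B
-- _MASK = 0xFFFF  # polynomials live in 16-bit words
--
-- # _RED[h] = remainder of h*x^8 modulo _POLY (eight xtime steps)
-- _RED = []
-- for _h in range(256):
--     _t = _h
--     for _ in range(8):
--         _t <<= 1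
--         if _t & 0x100:
--             _t ^= _POLY
--     _RED.append(_t)
--
--
-- def _deg(x):
--     # degree of the polynomial word; -1 for the zero polynomial
--     return (x & _MASK).bit_length() - 1
--
--
-- def _reduce(r):
--     # remainder of the polynomial word modulo _POLY (zero polynomial -> 0):
--     # fold the upper byte of the word back down with one table lookup
--     if _deg(r) < 0:
--         return 0
--     h = (r >> 8) & 0xFF
--     return r ^ (h << 8) ^ _RED[h]
--
--
-- def polyMultiply(a, b):
--     if _deg(a) < 0 or _deg(b) < 0:
--         return 0
--     # nibble multiples of a: m[v] = carry-less product a*v for v in 0..15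
--     m = [0] * 16
--     for v in range(1, 16):
--         m[v] = (m[v >> 1] << 1) ^ (a if v & 1 else 0)
--     r = 0
--     for s in (0, 4, 8, 12):
--         r ^= m[(b >> s) & 0xF] << s
--     return _reduce(r)
-- ===== Notes on version B (the rewrite author's own statement) =====
-- stated objective: alternative
-- what changed: B replaces A's 16-step bit-at-a-time product loop and polyMod's while-loop (which rescans the degree with getDegree several times per iteration) by a 4-bit windowed multiply over a 16-entry table of nibble multiples and a single-step reduction that folds the upper byte back with one lookup in a precomputed 256-entry xtime table.
import Mathlib
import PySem

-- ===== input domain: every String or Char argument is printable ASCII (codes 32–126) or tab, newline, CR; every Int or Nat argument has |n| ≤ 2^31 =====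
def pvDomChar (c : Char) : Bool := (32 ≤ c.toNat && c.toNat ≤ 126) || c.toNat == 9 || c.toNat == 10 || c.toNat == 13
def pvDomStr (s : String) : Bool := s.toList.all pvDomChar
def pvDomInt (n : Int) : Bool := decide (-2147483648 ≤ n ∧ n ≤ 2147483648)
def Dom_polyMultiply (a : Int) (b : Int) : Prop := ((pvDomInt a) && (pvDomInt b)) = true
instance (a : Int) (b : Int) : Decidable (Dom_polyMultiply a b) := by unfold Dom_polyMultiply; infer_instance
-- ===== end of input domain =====

-- B replaces A's bit-at-a-time product loop and repeated getDegree division scans by a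
-- 4-bit windowed table multiply and a one-lookup table reduction (objective: alternative).

-- ===== PORT A =====
-- for i in range(15, -1, -1): if (a >> i) & 1: return i / return -1
def degAux (a : Int) : Nat → Int
  | 0 => if PySem.Int.band (a >>> (0:Nat)) 1 == 1 then 0 else -1
  | i+1 => if PySem.Int.band (a >>> (i+1)) 1 == 1 then ((i:Int)+1) else degAux a i

def getDegree (a : Int) : Int := degAux a 15

-- the while-loop of polyMod; fuel 16 suffices: getDegree a ≤ 15 and it strictly
-- decreases every iteration, so the Python loop runs at most 16 times.
-- (.toNat on the shift amount is exact: the branch requires getDegree a ≥ getDegree m)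
def polyModLoop (a m : Int) : Nat → Int
  | 0 => a
  | f+1 =>
    if getDegree a ≥ getDegree m then
      polyModLoop (PySem.Int.bxor a (m <<< (getDegree a - getDegree m).toNat)) m f
    else a

def polyMod (a m : Int) : Int :=
  if getDegree a == -1 || getDegree m == -1 then 0 else polyModLoop a m 16

def polyMultiply (a : Int) (b : Int) : Int :=
  if getDegree a == -1 || getDegree b == -1 then 0
  else polyMod ((List.range 16).foldl
    (fun (result : Int) (i : Nat) => if PySem.Int.band (b >>> i) 1 == 1 then PySem.Int.bxor result (a <<< i) else result) 0) 283

-- ===== PORT B =====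
-- module-level table: _RED[h] = remainder of h*x^8, built by eight xtime steps
def redTab : List Int :=
  (List.range 256).foldl (fun acc h =>
    acc ++ [(List.range 8).foldl (fun (t : Int) _ =>
      let t := t <<< (1:Nat)
      if PySem.Int.band t 256 ≠ 0 then PySem.Int.bxor t 283 else t) ((h:Int))]) []

-- _deg(x) = (x & 0xFFFF).bit_length() - 1
def degB (x : Int) : Int := (PySem.Int.bitLength (PySem.Int.band x 65535) : Int) - 1

-- the m[]-building loop: m[v] = (m[v >> 1] << 1) ^ (a if v & 1 else 0) for v in range(1, 16)
def mfold (a : Int) : List Int :=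
  (List.range' 1 15).foldl (fun (m : List Int) (v : Nat) =>
    m.set v (PySem.Int.bxor ((m.getD (v >>> 1) 0) <<< (1:Nat)) (if v % 2 == 1 then a else 0)))
    (List.replicate 16 0)

-- _reduce(r): remainder of the polynomial word modulo _POLY (zero polynomial -> 0)
def reduceWord (r : Int) : Int :=
  if degB r < 0 then 0
  else
    let h := PySem.Int.band (r >>> (8:Nat)) 255
    PySem.Int.bxor (PySem.Int.bxor r (h <<< (8:Nat))) (redTab.getD h.toNat 0)

def polyMultiply_alt (a : Int) (b : Int) : Int :=
  if degB a < 0 ∨ degB b < 0 then 0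
  else
    -- r ^= m[(b >> s) & 0xF] << s for s in (0, 4, 8, 12), m = the nibble table
    reduceWord (([0, 4, 8, 12] : List Nat).foldl (fun (r : Int) (s : Nat) =>
      PySem.Int.bxor r (((mfold a).getD (PySem.Int.band (b >>> s) 15).toNat 0) <<< s)) 0)

-- ===== PRECONDITION & SPEC =====
def Spec_polyMultiply (a : Int) (b : Int) (out : Int) : Prop := out = polyMultiply_alt a b
instance (a : Int) (b : Int) (out : Int) : Decidable (Spec_polyMultiply a b out) := by unfold Spec_polyMultiply; infer_instance

-- ===== CLAIM (what is proved, stated in full; the proofs are below) =====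
def Claim_equal_polyMultiply : Prop := ∀ (a : Int) (b : Int), Dom_polyMultiply a b → Spec_polyMultiply a b (polyMultiply a b)

-- ===== LEMMAS AND PROOFS =====

-- Int.xor basics
theorem ixor_zero (x : Int) : Int.xor x 0 = x := by
  cases x <;> simp [Int.xor]
theorem izero_xor (x : Int) : Int.xor 0 x = x := by
  cases x <;> simp [Int.xor]
theorem ixor_assoc (x y z : Int) : Int.xor (Int.xor x y) z = Int.xor x (Int.xor y z) := by
  cases x <;> cases y <;> cases z <;> simp [Int.xor, Nat.xor_assoc]

theorem bxor_eq (x y : Int) : PySem.Int.bxor x y = Int.xor x y := by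
  cases x <;> cases y <;> simp [PySem.Int.bxor, Int.xor, Int.negSucc_eq] <;> omega

-- extensionality by bits
theorem int_ext (x y : Int) (h : ∀ i : Nat, x.testBit i = y.testBit i) : x = y := by
  cases x with
  | ofNat m =>
    cases y with
    | ofNat n =>
      congr 1
      apply Nat.eq_of_testBit_eq
      intro i
      simpa [Int.testBit] using h i
    | negSucc n =>
      exfalso
      have hi := h (max m n)
      have h1 : m < 2 ^ (max m n) := lt_of_lt_of_le (Nat.lt_two_pow_self) (Nat.pow_le_pow_right (by norm_num) (le_max_left _ _))
      have h2 : n < 2 ^ (max m n) := lt_of_lt_of_le (Nat.lt_two_pow_self) (Nat.pow_le_pow_right (by norm_num) (le_max_right _ _))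
      simp [Int.testBit, Nat.testBit_lt_two_pow h1, Nat.testBit_lt_two_pow h2] at hi
  | negSucc m =>
    cases y with
    | ofNat n =>
      exfalso
      have hi := h (max m n)
      have h1 : m < 2 ^ (max m n) := lt_of_lt_of_le (Nat.lt_two_pow_self) (Nat.pow_le_pow_right (by norm_num) (le_max_left _ _))
      have h2 : n < 2 ^ (max m n) := lt_of_lt_of_le (Nat.lt_two_pow_self) (Nat.pow_le_pow_right (by norm_num) (le_max_right _ _))
      simp [Int.testBit, Nat.testBit_lt_two_pow h1, Nat.testBit_lt_two_pow h2] at hi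
    | negSucc n =>
      congr 1
      apply Nat.eq_of_testBit_eq
      intro i
      simpa [Int.testBit] using h i

theorem ixor_comm (x y : Int) : Int.xor x y = Int.xor y x := by
  apply int_ext; intro i; rw [Int.testBit_lxor, Int.testBit_lxor, Bool.xor_comm]

theorem ixor_left_comm (x y z : Int) : Int.xor x (Int.xor y z) = Int.xor y (Int.xor x z) := by
  rw [← ixor_assoc, ixor_comm x y, ixor_assoc]

theorem ixor_self (x : Int) : Int.xor x x = 0 := by
  apply int_ext; intro i
  rw [Int.testBit_lxor, Bool.xor_self]
  simp [Int.testBit]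

-- testBit of shifts
theorem tb_shr (x : Int) (s n : Nat) : (x >>> s).testBit n = x.testBit (s + n) := by
  cases x with
  | ofNat m =>
    have h : (Int.ofNat m) >>> s = Int.ofNat (m >>> s) := by
      rw [← Int.shiftRight_natCast_right]; exact_mod_cast Int.shiftRight_natCast m s
    rw [h]; simp [Int.testBit, Nat.testBit_shiftRight]
  | negSucc m =>
    have h : (Int.negSucc m) >>> s = Int.negSucc (m >>> s) := by
      rw [← Int.shiftRight_natCast_right]; exact Int.shiftRight_negSucc m s
    rw [h]; simp [Int.testBit, Nat.testBit_shiftRight]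

theorem tb_shl (x : Int) (s n : Nat) :
    (x <<< s).testBit n = (decide (s ≤ n) && x.testBit (n - s)) := by
  cases x with
  | ofNat m =>
    show (Int.ofNat (m <<< s)).testBit n = _
    simp [Int.testBit, Nat.testBit_shiftLeft]
  | negSucc m =>
    show (Int.negSucc ((m+1) <<< s - 1)).testBit n = _
    have hone : 1 ≤ (2:Nat)^s := Nat.one_le_two_pow
    have he : (m+1) <<< s - 1 = 2^s * m + (2^s - 1) := by
      rw [Nat.shiftLeft_eq]
      have h2 : (m+1) * 2^s = 2^s * m + 2^s := by ring
      omega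
    simp only [Int.testBit, he]
    rw [Nat.testBit_two_pow_mul_add _ (by omega : (2:Nat)^s - 1 < 2^s) n]
    by_cases hn : n < s
    · have hns : ¬ (s ≤ n) := by omega
      simp [hn, Nat.testBit_two_pow_sub_one, hns]
    · have hns : s ≤ n := by omega
      simp [hn, hns]

theorem xor_shl (x y : Int) (s : Nat) :
    (Int.xor x y) <<< s = Int.xor (x <<< s) (y <<< s) := by
  apply int_ext; intro i
  rw [tb_shl, Int.testBit_lxor, Int.testBit_lxor, tb_shl, tb_shl]
  by_cases h : s ≤ i <;> simp [h]

theorem shl_off (x : Int) (j s : Nat) : (x <<< j) <<< s = x <<< (s + j) := by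
  rw [← Int.shiftLeft_add, Nat.add_comm]

-- testBit through % 2^k and band masks
theorem tb0 (x : Int) : x.testBit 0 = true ↔ x % 2 = 1 := by
  cases x <;> simp [Int.testBit, Nat.testBit_eq_decide_div_mod_eq, Int.negSucc_eq] <;> omega

theorem tb_div (x : Int) (i : Nat) : x.testBit i = true ↔ x / (2:Int)^i % 2 = 1 := by
  have h := tb_shr x i 0
  rw [Nat.add_zero] at h
  rw [← h, tb0, Int.shiftRight_eq_div_pow]
  norm_num

theorem tb_false (x : Int) (i : Nat) : x.testBit i = false ↔ x / (2:Int)^i % 2 = 0 := by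
  have h2 := tb_div x i
  generalize ht : x / (2:Int)^i = t at h2 ⊢
  constructor
  · intro h
    have hn : ¬ (x.testBit i = true) := by rw [h]; exact Bool.noConfusion
    have := h2.not.1 hn
    omega
  · intro h
    have hn : ¬ (t % 2 = 1) := by omega
    have := h2.not.2 hn
    exact Bool.not_eq_true _ |>.mp this

theorem band_test (x : Int) (i : Nat) :
    (PySem.Int.band (x >>> i) 1 == 1) = x.testBit i := by
  rw [PySem.Int.band_one, PySem.Int.mod_eq_emod_of_pos (by norm_num)]
  have h := tb_shr x i 0
  rw [Nat.add_zero] at h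
  rw [← h]
  by_cases hc : (x >>> i) % 2 = 1
  · rw [(tb0 _).2 hc]
    simp [hc]
  · have h2 : (x >>> i).testBit 0 = false := by
      rcases hh : (x >>> i).testBit 0 with _|_
      · rfl
      · exact absurd ((tb0 _).1 hh) hc
    rw [h2]
    simp [hc]

theorem tb_modpow (x : Int) (k i : Nat) (h : i < k) :
    (x % ((2:Int)^k)).testBit i = x.testBit i := by
  have hq : x % (2:Int)^k = x + (-((2:Int)^(k-i) * (x / (2:Int)^k))) * 2^i := by
    have h65 : ((2:Int)^(k-i)) * 2^i = (2:Int)^k := by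
      rw [← pow_add, Nat.sub_add_cancel (by omega)]
    have := Int.emod_def x ((2:Int)^k)
    rw [this]; rw [← h65]; ring
  have key : (x % (2:Int)^k) / 2^i % 2 = x / 2^i % 2 := by
    rw [hq, Int.add_mul_ediv_right _ _ (by positivity : ((2:Int)^i) ≠ 0)]
    obtain ⟨c, hc⟩ : (2:Int) ∣ 2^(k-i) := dvd_pow_self 2 (by omega)
    rw [hc]
    have : x / 2 ^ i + -(2 * c * (x / 2^k)) = x / 2^i + 2 * (-(c * (x / 2^k))) := by ring
    rw [this, Int.add_mul_emod_self_left]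
  rcases hbt : x.testBit i with _|_
  · have := (tb_false x i).1 hbt
    rw [← key] at this
    exact (tb_false _ i).2 this
  · have := (tb_div x i).1 hbt
    rw [← key] at this
    exact (tb_div _ i).2 this

theorem tb_small (v : Int) (k i : Nat) (h0 : 0 ≤ v) (h1 : v < (2:Int)^k) (h : k ≤ i) :
    v.testBit i = false := by
  obtain ⟨n, rfl⟩ : ∃ n : Nat, v = (n : Int) := ⟨v.toNat, by omega⟩
  have hn : n < 2^i := by
    have h2 : ((2:Int)^k) ≤ (2:Int)^i := pow_le_pow_right₀ (by norm_num) h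
    have h3 : (n:Int) < (2:Int)^i := lt_of_lt_of_le h1 h2
    exact_mod_cast h3
  simpa [Int.testBit] using Nat.testBit_lt_two_pow hn

theorem tb_cast (n : Nat) (i : Nat) : ((n : Int)).testBit i = n.testBit i := by
  simp [Int.testBit]

-- PySem.Int.band with an all-ones mask is the corresponding modulus
theorem band_mask (x : Int) (k : Nat) :
    PySem.Int.band x (((2:Nat)^k - 1 : Nat) : Int) = PySem.Int.mod x (((2:Nat)^k : Nat) : Int) := by
  have hkp : (0:Nat) < 2^k := Nat.two_pow_pos k
  have hp : (0:Int) < ((2:Nat)^k : Nat) := by exact_mod_cast hkp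
  rw [PySem.Int.mod_eq_emod_of_pos hp]
  unfold PySem.Int.band
  have hm : (0:Int) ≤ (((2:Nat)^k - 1 : Nat) : Int) := by positivity
  by_cases hx : (0:Int) ≤ x
  · obtain ⟨nn, rfl⟩ : ∃ nn : Nat, x = (nn : Int) := ⟨x.toNat, by omega⟩
    rw [if_pos hx, if_pos hm]
    have ht : ((((2:Nat)^k - 1 : Nat) : Int)).toNat = 2^k - 1 := by omega
    have ht2 : ((nn : Int)).toNat = nn := by omega
    rw [ht, ht2, Nat.and_two_pow_sub_one_eq_mod, ← Int.natCast_mod]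
  · rw [if_neg hx, if_pos hm]
    have ht : ((((2:Nat)^k - 1 : Nat) : Int)).toNat = 2^k - 1 := by omega
    rw [ht, Nat.and_comm, Nat.and_two_pow_sub_one_eq_mod]
    set n := (-x-1).toNat with hn
    set q := n / 2^k with hq
    set r := n % 2^k with hr
    have hrlt : r < 2^k := Nat.mod_lt _ hkp
    have hnqr : n = 2^k * q + r := (Nat.div_add_mod n (2^k)).symm
    have hnqr' : (n : Int) = (((2:Nat)^k : Nat) : Int) * (q : Int) + (r : Int) := by exact_mod_cast hnqr
    have hxn : x = -(n : Int) - 1 := by omega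
    have hxe : x = ((((2:Nat)^k : Nat) : Int) - 1 - (r:Int)) + (-(q:Int) - 1) * (((2:Nat)^k : Nat) : Int) := by
      rw [hxn, hnqr']; ring
    have hmod : x % (((2:Nat)^k : Nat) : Int) = (((2:Nat)^k : Nat) : Int) - 1 - (r:Int) := by
      rw [hxe, Int.add_mul_emod_self_right]
      apply Int.emod_eq_of_lt
      · omega
      · omega
    rw [hmod]
    omega

theorem band15 (x : Int) : PySem.Int.band x 15 = x % 16 := by
  have := band_mask x 4; norm_num at this; exact this
theorem band255 (x : Int) : PySem.Int.band x 255 = x % 256 := by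
  have := band_mask x 8; norm_num at this; exact this
theorem band65535 (x : Int) : PySem.Int.band x 65535 = x % 65536 := by
  have := band_mask x 16; norm_num at this; exact this

-- degAux characterisation
theorem deg_zero (x : Int) : degAux x 0 = if x.testBit 0 then 0 else -1 := by
  have h := band_test x 0
  rw [Int.shiftRight_zero] at h
  simp [degAux, h]
theorem deg_succ (x : Int) (i : Nat) :
    degAux x (i+1) = if x.testBit (i+1) then ((i:Int)+1) else degAux x i := by
  simp [degAux, band_test]

theorem dle (x : Int) (k : Nat) : degAux x k ≤ (k:Int) := by
  induction k with
  | zero => rw [deg_zero]; split <;> omega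
  | succ i ih => rw [deg_succ]; split <;> push_cast <;> omega

theorem dneg1_le (x : Int) (k : Nat) : -1 ≤ degAux x k := by
  induction k with
  | zero => rw [deg_zero]; split <;> omega
  | succ i ih => rw [deg_succ]; split <;> omega

theorem dbit (x : Int) (k : Nat) (h : 0 ≤ degAux x k) :
    x.testBit (degAux x k).toNat = true := by
  induction k with
  | zero =>
    rw [deg_zero] at h ⊢
    rcases hb : x.testBit 0 with _|_
    · rw [hb] at h; simp at h
    · simp [hb]
  | succ i ih =>
    rw [deg_succ] at h ⊢
    rcases hb : x.testBit (i+1) with _|_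
    · simp only [hb] at h ⊢
      simp only [Bool.false_eq_true, if_false] at h ⊢
      exact ih h
    · simp only [if_true]
      have heq : ((i:Int)+1).toNat = i+1 := by omega
      rw [heq]; exact hb

theorem dupper (x : Int) (k : Nat) : ∀ i : Nat, i ≤ k → degAux x k < (i:Int) → x.testBit i = false := by
  induction k with
  | zero =>
    intro i hi hlt
    interval_cases i
    rw [deg_zero] at hlt
    rcases hb : x.testBit 0 with _|_
    · rfl
    · rw [hb] at hlt; simp at hlt
  | succ n ih =>
    intro i hi hlt
    rw [deg_succ] at hlt
    rcases hb : x.testBit (n+1) with _|_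
    · simp only [hb, Bool.false_eq_true, if_false] at hlt
      rcases Nat.lt_or_ge i (n+1) with h1 | h1
      · exact ih i (by omega) hlt
      · have : i = n+1 := by omega
        rw [this]; exact hb
    · simp only [hb, if_true] at hlt
      exfalso
      have := dle x n
      omega

theorem dge (x : Int) (k : Nat) : ∀ i : Nat, i ≤ k → x.testBit i = true → (i:Int) ≤ degAux x k := by
  induction k with
  | zero =>
    intro i hi hb; interval_cases i
    rw [deg_zero, hb]; simp
  | succ n ih =>
    intro i hi hb
    rw [deg_succ]
    rcases hbn : x.testBit (n+1) with _|_
    · simp only [Bool.false_eq_true, if_false]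
      have hin : i ≤ n := by
        rcases Nat.eq_or_lt_of_le hi with h1 | h1
        · exfalso; rw [h1, hbn] at hb; exact Bool.noConfusion hb
        · omega
      exact ih i hin hb
    · simp only [if_true]; omega

theorem dneg1 (x : Int) (k : Nat) : degAux x k = -1 ↔ ∀ i : Nat, i ≤ k → x.testBit i = false := by
  constructor
  · intro h i hi
    exact dupper x k i hi (by omega)
  · intro h
    rcases Int.lt_or_le (degAux x k) 0 with h1 | h1
    · have := dneg1_le x k; omega
    · exfalso
      have hb := dbit x k h1
      have hle := dle x k
      have : (degAux x k).toNat ≤ k := by omega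
      rw [h _ this] at hb; exact Bool.noConfusion hb

theorem dle_bits (x : Int) (k : Nat) (j : Int) (hj : -1 ≤ j)
    (h : ∀ i : Nat, i ≤ k → j < (i:Int) → x.testBit i = false) : degAux x k ≤ j := by
  rcases Int.lt_or_le j (degAux x k) with h1 | h1
  · exfalso
    have h0 : 0 ≤ degAux x k := by omega
    have hb := dbit x k h0
    have hle := dle x k
    have hik : (degAux x k).toNat ≤ k := by omega
    have := h _ hik (by omega)
    rw [this] at hb; exact Bool.noConfusion hb
  · exact h1

-- the zero guards: getDegree x = -1 ↔ x % 65536 = 0 ↔ degB x < 0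
theorem guard_iff (x : Int) : degAux x 15 = -1 ↔ x % 65536 = 0 := by
  rw [dneg1]
  have h16 : ((65536:Int)) = (2:Int)^16 := by norm_num
  constructor
  · intro h
    apply int_ext; intro i
    rcases Nat.lt_or_ge i 16 with hi | hi
    · rw [h16, tb_modpow x 16 i hi, h i (by omega)]
      simp [Int.testBit]
    · rw [tb_small _ 16 i (Int.emod_nonneg x (by norm_num)) (by rw [← h16]; exact Int.emod_lt_of_pos x (by norm_num)) hi]
      simp [Int.testBit]
  · intro h i hi
    have := tb_modpow x 16 i (by omega)
    rw [← h16, h] at this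
    rw [← this]
    simp [Int.testBit]

theorem guardB (x : Int) : degB x < 0 ↔ degAux x 15 = -1 := by
  unfold degB
  rw [band65535, guard_iff]
  have hnn : 0 ≤ x % 65536 := Int.emod_nonneg x (by norm_num)
  constructor
  · intro h
    by_contra hne
    have hpos : 0 < x % 65536 := by omega
    have := PySem.Int.bitLength_of_pos hpos
    omega
  · intro h
    rw [h]
    norm_num [PySem.Int.bitLength_zero]

-- descending index list [15, 14, …, 8] and A's reduction as a single scan over it
def dList : Nat → List Int
  | 0 => []
  | j+1 => if j+1 < 8 then [] else ((j+1 : Nat) : Int) :: dList j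

def scanFold (x : Int) : Int :=
  (dList 15).foldl (fun r i =>
    if PySem.Int.band (r >>> i.toNat) 1 == 1 then PySem.Int.bxor r ((283:Int) <<< (i - 8).toNat) else r) x

theorem deg283 : getDegree 283 = 8 := by decide
theorem t283_hi (m : Nat) (h : 8 < m) : (283:Nat).testBit m = false :=
  Nat.testBit_lt_two_pow (lt_of_lt_of_le (by norm_num) (Nat.pow_le_pow_right (by norm_num) h))
theorem tb_shl283 (s i : Nat) :
    ((283:Int) <<< s).testBit i = (decide (s ≤ i) && (283:Nat).testBit (i-s)) := by
  have h : ((283:Int) <<< s) = ((283 <<< s : Nat) : Int) := by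
    rw [← Int.shiftLeft_natCast_right]
    exact_mod_cast (Int.shiftLeft_natCast 283 s)
  rw [h]
  have h2 : ((283 <<< s : Nat) : Int) = Int.ofNat (283 <<< s) := rfl
  rw [h2]
  simp [Int.testBit, Nat.testBit_shiftLeft, ge_iff_le]

-- clearing the top window bit
theorem clear_top (x : Int) (k : Nat) (hk : k ≤ 7) (hd : degAux x 15 = 8 + (k:Int)) :
    degAux (Int.xor x ((283:Int) <<< k)) 15 ≤ 7 + (k:Int) := by
  apply dle_bits _ _ _ (by omega)
  intro i hi hgt
  rw [Int.testBit_lxor]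
  rcases Nat.eq_or_lt_of_le (show 8+k ≤ i by omega) with he | hlt
  · have hx : x.testBit i = true := by
      have h0 : 0 ≤ degAux x 15 := by omega
      have hb := dbit x 15 h0
      rw [hd] at hb
      have ht : ((8:Int) + (k:Int)).toNat = i := by omega
      rwa [ht] at hb
    have hs : ((283:Int) <<< k).testBit i = true := by
      rw [tb_shl283]
      have h1 : k ≤ i := by omega
      have h2 : i - k = 8 := by omega
      simp [h1, h2]
      decide
    rw [hx, hs]; rfl
  · have hx : x.testBit i = false := dupper x 15 i hi (by omega)
    have hs : ((283:Int) <<< k).testBit i = false := by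
      rw [tb_shl283]
      rcases Nat.lt_or_ge i k with h1 | h1
      · simp [Nat.not_le.2 h1]
      · rw [t283_hi (i-k) (by omega)]; simp
    rw [hx, hs]; rfl

theorem pml_done (f : Nat) (x : Int) (h : degAux x 15 ≤ 7) : polyModLoop x 283 f = x := by
  cases f with
  | zero => rfl
  | succ f =>
    show (if getDegree x ≥ getDegree 283 then _ else x) = x
    rw [if_neg]
    rw [deg283]
    show ¬ (8 ≤ degAux x 15)
    omega

theorem dList_cons (j : Nat) (h : 8 ≤ j+1) : dList (j+1) = ((j+1 : Nat) : Int) :: dList j := by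
  show (if j+1 < 8 then [] else ((j+1 : Nat) : Int) :: dList j) = _
  rw [if_neg (by omega)]

theorem red_lemma (k : Nat) : k ≤ 8 → ∀ (x : Int) (f : Nat), k ≤ f → degAux x 15 ≤ 7 + (k:Int) →
    polyModLoop x 283 f = (dList (7+k)).foldl
      (fun r i => if PySem.Int.band (r >>> i.toNat) 1 == 1
                  then PySem.Int.bxor r ((283:Int) <<< (i - 8).toNat) else r) x := by
  induction k with
  | zero =>
    intro _ x f _ hdeg
    have : dList 7 = [] := by decide
    rw [this]
    simpa using pml_done f x (by simpa using hdeg)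
  | succ k ih =>
    intro hk8 x f hf hdeg
    cases f with
    | zero => omega
    | succ f =>
      have hcons : dList (7+(k+1)) = ((8+k : Nat) : Int) :: dList (7+k) := by
        have : 7+(k+1) = (7+k)+1 := by omega
        rw [this, dList_cons (7+k) (by omega)]
        congr 1
        push_cast
        omega
      rw [hcons]
      simp only [List.foldl_cons]
      have htn : (((8+k : Nat) : Int)).toNat = 8+k := by omega
      have hsn : (((8+k : Nat) : Int) - 8).toNat = k := by omega
      rw [htn, hsn]
      rw [Int.shiftRight_natCast_right, Int.shiftLeft_natCast_right, band_test]
      rcases hb : x.testBit (8+k) with _|_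
      · simp only [Bool.false_eq_true, if_false]
        have hne : degAux x 15 ≠ 8 + (k:Int) := by
          intro hEq
          have h0 : 0 ≤ degAux x 15 := by omega
          have := dbit x 15 h0
          rw [hEq] at this
          have ht : ((8:Int) + (k:Int)).toNat = 8+k := by omega
          rw [ht, hb] at this
          exact Bool.noConfusion this
        have hdeg' : degAux x 15 ≤ 7 + (k:Int) := by push_cast at hdeg ⊢; omega
        exact ih (by omega) x (f+1) (by omega) hdeg'
      · have hEq : degAux x 15 = 8 + (k:Int) := by
          have := dge x 15 (8+k) (by omega) hb
          push_cast at this hdeg ⊢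
          omega
        show (if getDegree x ≥ getDegree 283 then _ else x) = _
        rw [if_pos (by rw [deg283]; show (8:Int) ≤ degAux x 15; omega)]
        rw [deg283]
        show polyModLoop (PySem.Int.bxor x ((283:Int) <<< (degAux x 15 - 8).toNat)) 283 f = _
        have hsh : (degAux x 15 - 8).toNat = k := by rw [hEq]; omega
        rw [hsh, bxor_eq]
        exact ih (by omega) _ f (by omega) (clear_top x k (by omega) hEq)

theorem pml_scan (x : Int) : polyModLoop x 283 16 = scanFold x := by
  have h := red_lemma 8 (by omega) x 16 (by omega) (by have := dle x 15; push_cast at this ⊢; omega)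
  rw [h]; rfl

-- the scan ignores (and passes through) an xor mask with no bits in 8..15
theorem scan_xor_aux (l : List Int) (x y : Int)
    (hl : ∀ i ∈ l, (8:Int) ≤ i ∧ i ≤ 15)
    (hy : ∀ j : Nat, 8 ≤ j → j ≤ 15 → y.testBit j = false) :
    l.foldl (fun r i =>
      if PySem.Int.band (r >>> i.toNat) 1 == 1 then PySem.Int.bxor r ((283:Int) <<< (i - 8).toNat) else r)
      (Int.xor x y)
    = Int.xor (l.foldl (fun r i =>
      if PySem.Int.band (r >>> i.toNat) 1 == 1 then PySem.Int.bxor r ((283:Int) <<< (i - 8).toNat) else r) x) y := by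
  induction l generalizing x with
  | nil => simp
  | cons i t ih =>
    obtain ⟨hi1, hi2⟩ := hl i (List.mem_cons_self)
    simp only [List.foldl_cons]
    have hbt : y.testBit i.toNat = false := hy i.toNat (by omega) (by omega)
    have hcond : (PySem.Int.band ((Int.xor x y) >>> ((i.toNat : Nat) : Int)) 1 == 1)
        = (PySem.Int.band (x >>> ((i.toNat : Nat) : Int)) 1 == 1) := by
      rw [Int.shiftRight_natCast_right, Int.shiftRight_natCast_right, band_test, band_test,
          Int.testBit_lxor, hbt, Bool.xor_false]
    rw [hcond]
    by_cases hc : (PySem.Int.band (x >>> ((i.toNat : Nat) : Int)) 1 == 1) = true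
    · rw [if_pos hc, if_pos hc, bxor_eq, bxor_eq]
      have hsw : ∀ C : Int, Int.xor (Int.xor x y) C = Int.xor (Int.xor x C) y := by
        intro C
        rw [ixor_assoc, ixor_assoc, ixor_comm y]
      rw [hsw]
      exact ih _ (fun j hj => hl j (List.mem_cons_of_mem _ hj))
    · rw [if_neg hc, if_neg hc]
      exact ih _ (fun j hj => hl j (List.mem_cons_of_mem _ hj))

theorem scan_xor (x y : Int)
    (hy : ∀ j : Nat, 8 ≤ j → j ≤ 15 → y.testBit j = false) :
    scanFold (Int.xor x y) = Int.xor (scanFold x) y :=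
  scan_xor_aux (dList 15) x y (by decide) hy

-- the 256-entry reduction table agrees with the scan on pure upper-byte words
set_option maxRecDepth 10000 in
theorem scan_tab : ∀ hh : Fin 256, scanFold ((hh:Int) <<< (8:Nat)) = redTab.getD hh 0 := by
  decide

-- ===== the multiply side =====
def ysum (aa bv : Int) : Nat → Int
  | 0 => 0
  | n+1 => Int.xor (ysum aa bv n) (if bv.testBit n then aa <<< n else 0)

theorem fold_ysum (a b : Int) (n : Nat) (r : Int) :
    (List.range n).foldl
      (fun (result : Int) (i : Nat) => if PySem.Int.band (b >>> i) 1 == 1 then PySem.Int.bxor result (a <<< i) else result) r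
    = Int.xor r (ysum a b n) := by
  induction n with
  | zero => show r = Int.xor r 0; rw [ixor_zero]
  | succ n ih =>
    rw [List.range_succ, List.foldl_append, ih]
    show (if PySem.Int.band (b >>> n) 1 == 1 then PySem.Int.bxor (Int.xor r (ysum a b n)) (a <<< n) else Int.xor r (ysum a b n)) = _
    rw [band_test]
    rcases hbt : b.testBit n with _|_
    · simp only [Bool.false_eq_true, if_false]
      show _ = Int.xor r (Int.xor (ysum a b n) (if b.testBit n then a <<< n else 0))
      rw [hbt]
      simp only [Bool.false_eq_true, if_false]
      rw [ixor_zero]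
    · simp only [if_true]
      rw [bxor_eq, ixor_assoc]
      show _ = Int.xor r (Int.xor (ysum a b n) (if b.testBit n then a <<< n else 0))
      rw [hbt]
      simp

theorem chunk (a b : Int) (s : Nat) (w : Nat) (hw : w < 16)
    (hb : ∀ j : Nat, j < 4 → w.testBit j = b.testBit (s+j)) :
    Int.xor (ysum a b s) (((mfold a).getD w 0) <<< s) = ysum a b (s+4) := by
  have h0 := hb 0 (by omega)
  have h1 := hb 1 (by omega)
  have h2 := hb 2 (by omega)
  have h3 := hb 3 (by omega)
  interval_cases w <;>
  · simp [Nat.testBit_eq_decide_div_mod_eq] at h0 h1 h2 h3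
    simp [ysum, h0, h1, h2, h3, mfold, List.range', bxor_eq, xor_shl, shl_off,
          ixor_zero, izero_xor, ixor_assoc, ixor_comm, ixor_left_comm]

theorem chunk' (a b : Int) (s : Nat) :
    Int.xor (ysum a b s) (((mfold a).getD (PySem.Int.band (b >>> s) 15).toNat 0) <<< s) = ysum a b (s+4) := by
  have h1 : 0 ≤ (b >>> s) % 16 := Int.emod_nonneg _ (by norm_num)
  have h2 : (b >>> s) % 16 < 16 := Int.emod_lt_of_pos _ (by norm_num)
  apply chunk
  · rw [band15]; omega
  · intro j hj
    rw [band15]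
    have hcast : ((((b >>> s) % 16).toNat : Nat) : Int) = (b >>> s) % 16 := by omega
    rw [← tb_cast, hcast]
    have h16 : ((16:Int)) = (2:Int)^4 := by norm_num
    rw [h16, tb_modpow _ 4 j hj, tb_shr]

theorem prod_eq (a b : Int) :
    ([0, 4, 8, 12] : List Nat).foldl (fun (r : Int) (s : Nat) =>
      PySem.Int.bxor r (((mfold a).getD (PySem.Int.band (b >>> s) 15).toNat 0) <<< s)) 0
    = Int.xor 0 (ysum a b 16) := by
  have k0 := chunk' a b 0
  rw [show ysum a b 0 = (0:Int) from rfl, izero_xor, show (0+4 : Nat) = 4 from rfl] at k0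
  simp only [List.foldl_cons, List.foldl_nil, bxor_eq]
  rw [izero_xor, k0, chunk' a b 4, show (4+4 : Nat) = 8 from rfl, chunk' a b 8,
      show (8+4 : Nat) = 12 from rfl, chunk' a b 12, show (12+4 : Nat) = 16 from rfl, izero_xor]

-- the reduction phase of both programs, as a function of the common product value
theorem key_red (R : Int) : polyMod R 283 = reduceWord R := by
  unfold polyMod reduceWord
  rw [show (getDegree 283 == -1) = false from by decide, Bool.or_false]
  by_cases hr : degB R < 0
  · rw [if_pos (show (getDegree R == -1) = true from beq_iff_eq.2 ((guardB R).1 hr)), if_pos hr]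
  · rw [if_neg (show ¬ (getDegree R == -1) = true from by
        rw [beq_iff_eq]; exact fun hh => hr ((guardB R).2 hh)), if_neg hr]
    rw [pml_scan]
    set h := PySem.Int.band (R >>> (8:Nat)) 255 with hdef
    have hmod : h = (R >>> (8:Nat)) % 256 := band255 _
    have hnn : 0 ≤ h := by rw [hmod]; exact Int.emod_nonneg _ (by norm_num)
    have hlt : h < 256 := by rw [hmod]; exact Int.emod_lt_of_pos _ (by norm_num)
    have hy : ∀ j : Nat, 8 ≤ j → j ≤ 15 → (Int.xor R (h <<< (8:Nat))).testBit j = false := by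
      intro j hj1 hj2
      rw [Int.testBit_lxor, tb_shl]
      rw [show decide ((8:Nat) ≤ j) = true from by simp [hj1], Bool.true_and]
      rw [hmod, show ((256:Int)) = 2^8 from by norm_num, tb_modpow _ 8 (j-8) (by omega), tb_shr]
      rw [show 8 + (j-8) = j from by omega]
      exact Bool.xor_self _
    have hsplit : R = Int.xor (h <<< (8:Nat)) (Int.xor R (h <<< (8:Nat))) := by
      rw [ixor_left_comm, ixor_self, ixor_zero]
    have htab : scanFold (h <<< (8:Nat)) = redTab.getD h.toNat 0 := by
      have hcast : ((h.toNat : Nat) : Int) = h := by omega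
      have hfin := scan_tab ⟨h.toNat, by omega⟩
      simpa [hcast] using hfin
    calc scanFold R
        = scanFold (Int.xor (h <<< (8:Nat)) (Int.xor R (h <<< (8:Nat)))) := by rw [← hsplit]
      _ = Int.xor (scanFold (h <<< (8:Nat))) (Int.xor R (h <<< (8:Nat))) := scan_xor _ _ hy
      _ = Int.xor (redTab.getD h.toNat 0) (Int.xor R (h <<< (8:Nat))) := by rw [htab]
      _ = PySem.Int.bxor (PySem.Int.bxor R (h <<< (8:Nat))) (redTab.getD h.toNat 0) := by
          rw [bxor_eq, bxor_eq, ixor_comm]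

-- ===== VERDICT (by name: the statement is the Claim_ definition above) =====
set_option maxHeartbeats 1000000 in
theorem polyMultiply_spec : Claim_equal_polyMultiply := by
  intro a b _
  show polyMultiply a b = polyMultiply_alt a b
  by_cases hga : degB a < 0
  · have h1 : polyMultiply_alt a b = 0 := by unfold polyMultiply_alt; rw [if_pos (Or.inl hga)]
    have h2 : polyMultiply a b = 0 := by
      unfold polyMultiply
      rw [if_pos (by rw [Bool.or_eq_true, beq_iff_eq, beq_iff_eq]; exact Or.inl ((guardB a).1 hga))]
    rw [h1, h2]
  · by_cases hgb : degB b < 0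
    · have h1 : polyMultiply_alt a b = 0 := by unfold polyMultiply_alt; rw [if_pos (Or.inr hgb)]
      have h2 : polyMultiply a b = 0 := by
        unfold polyMultiply
        rw [if_pos (by rw [Bool.or_eq_true, beq_iff_eq, beq_iff_eq]; exact Or.inr ((guardB b).1 hgb))]
      rw [h1, h2]
    · have hAcond : ¬ ((getDegree a == -1 || getDegree b == -1) = true) := by
        rw [Bool.or_eq_true, beq_iff_eq, beq_iff_eq]
        rintro (hh | hh)
        · exact hga ((guardB a).2 hh)
        · exact hgb ((guardB b).2 hh)
      have hBcond : ¬ (degB a < 0 ∨ degB b < 0) := by tauto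
      have hR : (List.range 16).foldl
            (fun (result : Int) (i : Nat) => if PySem.Int.band (b >>> i) 1 == 1 then PySem.Int.bxor result (a <<< i) else result) 0
          = ([0, 4, 8, 12] : List Nat).foldl (fun (r : Int) (s : Nat) =>
              PySem.Int.bxor r (((mfold a).getD (PySem.Int.band (b >>> s) 15).toNat 0) <<< s)) 0 := by
        rw [fold_ysum, prod_eq]
      calc polyMultiply a b
          = polyMod (([0, 4, 8, 12] : List Nat).foldl (fun (r : Int) (s : Nat) =>
              PySem.Int.bxor r (((mfold a).getD (PySem.Int.band (b >>> s) 15).toNat 0) <<< s)) 0) 283 := by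
            unfold polyMultiply
            rw [if_neg hAcond, hR]
        _ = polyMultiply_alt a b := by
            unfold polyMultiply_alt
            rw [if_neg hBcond]
            exact key_red _
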